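-- pv_equiv track=rewrite | github.com/popojan/orbit | scripts/wildberger_pell_tree.py | M_function
-- ===== SOURCE A (Python) =====
-- import math
--
-- def M_function(n: int) -> int:
--     """
--     M(n) from primal forest: count of divisors d with 2 ≤ d ≤ √n
--
--     This is the number of "trees" at position n in primal forest visualization.
--     Primes have M(p) = 0 (clear view).
--     """
--     if n < 4:
--         return 0
--
--     sqrt_n = math.isqrt(n)
--     count = 0
--     for d in range(2, sqrt_n + 1):
--         if n % d == 0:
--             count += 1
--     return count
-- ===== SOURCE B (Python) =====
-- import math
--
-- def M_function(n: int) -> int: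
--     """M(n): count of divisors d with 2 <= d <= sqrt(n), via the divisor-count
--     formula tau(n) = prod(e_i + 1) from trial-division factorization."""
--     if n < 4:
--         return 0
--     m = n
--     tau = 1
--     p = 2
--     while p * p <= m:
--         if m % p == 0:
--             e = 0
--             while m % p == 0:
--                 e += 1
--                 m //= p
--             tau *= e + 1
--         p += 1
--     if m > 1:
--         tau *= 2
--     square = 1 if math.isqrt(n) ** 2 == n else 0
--     return (tau + square) // 2 - 1
-- ===== Notes on version B (the rewrite author's own statement) =====
-- stated objective: faster
-- what changed: Instead of testing every d in 2..isqrt(n) for divisibility, B factorizes n by trial division extracting prime exponents, computes tau(n) as the product of (e_i+1), and returns (tau + [n is a perfect square])//2 - 1, using the pairing d <-> n/d between small and large divisors.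
import Mathlib
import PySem

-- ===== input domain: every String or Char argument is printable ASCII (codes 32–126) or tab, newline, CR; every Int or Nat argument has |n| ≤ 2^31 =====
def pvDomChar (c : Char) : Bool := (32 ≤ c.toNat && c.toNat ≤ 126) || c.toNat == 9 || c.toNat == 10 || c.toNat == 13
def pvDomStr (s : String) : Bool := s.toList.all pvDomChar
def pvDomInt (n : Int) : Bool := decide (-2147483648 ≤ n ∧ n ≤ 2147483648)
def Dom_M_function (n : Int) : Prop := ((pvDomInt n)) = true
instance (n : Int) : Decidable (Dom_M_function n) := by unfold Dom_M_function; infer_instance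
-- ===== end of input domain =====

-- B is a different algorithm: it factorizes n, computes tau(n) = prod (e_i + 1),
-- and returns (tau + [n is a perfect square]) // 2 - 1, instead of testing every d in 2..isqrt(n).

-- ===== PORT A =====
-- math.isqrt(n) for n ≥ 0 is exactly Nat.sqrt n.toNat
def M_function (n : Int) : Int :=
  if n < 4 then 0
  else
    let sqrt_n : Int := (Nat.sqrt n.toNat : Int)
    (PySem.List.pyRange 2 (sqrt_n + 1) 1).foldl
      (fun count d => if PySem.Int.mod n d = 0 then count + 1 else count) 0

-- ===== PORT B =====
-- inner `while m % p == 0: e += 1; m //= p` loop of Source B; returns (e, remaining m).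
-- `fuel` (called with fuel = m) and the `2 <= p / 0 < m` guard parts only make the recursion total;
-- they are inert at every call site.
def pvExtract (fuel m p : Nat) : Nat × Nat :=
  match fuel with
  | 0 => (0, m)
  | fuel + 1 =>
    if 2 ≤ p ∧ 0 < m ∧ m % p = 0 then
      let r := pvExtract fuel (m / p) p
      (r.1 + 1, r.2)
    else (0, m)

-- outer `while p * p <= m` loop of Source B, accumulating tau multiplicatively;
-- `fuel` (called with fuel = 2*m, always sufficient) and `2 ≤ p` only make the recursion total.
def pvFactLoop (fuel m p : Nat) : Nat :=
  match fuel with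
  | 0 => 0
  | fuel + 1 =>
    if 2 ≤ p ∧ p * p ≤ m then
      if m % p = 0 then
        let r := pvExtract m m p
        (r.1 + 1) * pvFactLoop fuel r.2 (p + 1)
      else pvFactLoop fuel m (p + 1)
    else if 1 < m then 2 else 1

def M_function_alt (n : Int) : Int :=
  if n < 4 then 0
  else
    let nn := n.toNat
    let tau : Int := (pvFactLoop (2 * nn) nn 2 : Int)
    let square : Int := if Nat.sqrt nn * Nat.sqrt nn = nn then 1 else 0
    PySem.Int.floordiv (tau + square) 2 - 1

-- ===== PRECONDITION & SPEC =====
def Spec_M_function (n : Int) (out : Int) : Prop := out = M_function_alt n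
instance (n : Int) (out : Int) : Decidable (Spec_M_function n out) := by unfold Spec_M_function; infer_instance

-- ===== CLAIM (what is proved, stated in full; the proofs are below) =====
def Claim_equal_M_function : Prop := ∀ (n : Int), Dom_M_function n → Spec_M_function n (M_function n)

-- ===== LEMMAS AND PROOFS =====

-- pvExtract really extracts the full power of p (fuel ≥ m suffices)
theorem pvExtract_snd_le (fuel m p : Nat) : (pvExtract fuel m p).2 ≤ m := by
  induction fuel generalizing m with
  | zero => simp [pvExtract]
  | succ fuel ih =>
    rw [pvExtract]
    split_ifs with h
    · exact le_trans (ih (m / p)) (Nat.le_of_lt (Nat.div_lt_self h.2.1 (by omega)))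
    · exact le_refl m

theorem pvExtract_spec (fuel m p : Nat) (hp : 2 ≤ p) (hm : 0 < m) (hf : m ≤ fuel) :
    m = p ^ (pvExtract fuel m p).1 * (pvExtract fuel m p).2 ∧
      ¬ p ∣ (pvExtract fuel m p).2 ∧ 0 < (pvExtract fuel m p).2 := by
  induction fuel generalizing m with
  | zero => omega
  | succ fuel ih =>
    rw [pvExtract]
    by_cases hd : m % p = 0
    · rw [if_pos ⟨hp, hm, hd⟩]
      have hdvd : p ∣ m := Nat.dvd_of_mod_eq_zero hd
      have hqpos : 0 < m / p := Nat.div_pos (Nat.le_of_dvd hm hdvd) (by omega)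
      have hlt : m / p < m := Nat.div_lt_self hm (by omega)
      obtain ⟨h1, h2, h3⟩ := ih (m / p) hqpos (by omega)
      refine ⟨?_, h2, h3⟩
      calc m = p * (m / p) := (Nat.mul_div_cancel' hdvd).symm
        _ = p * (p ^ (pvExtract fuel (m / p) p).1 * (pvExtract fuel (m / p) p).2) := by rw [← h1]
        _ = p ^ ((pvExtract fuel (m / p) p).1 + 1) * (pvExtract fuel (m / p) p).2 := by ring
    · rw [if_neg (by tauto)]
      exact ⟨by simp, fun hc => hd (Nat.mod_eq_zero_of_dvd hc), hm⟩

-- pvFactLoop computes the number of divisors (fuel > m + (m - p) suffices)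
theorem pvFactLoop_eq_card (fuel m p : Nat) (hp : 2 ≤ p) (hm : 0 < m)
    (hmin : ∀ q, q.Prime → q ∣ m → p ≤ q) (hf : m + (m - p) < fuel) :
    pvFactLoop fuel m p = m.divisors.card := by
  induction fuel generalizing m p with
  | zero => omega
  | succ fuel ih =>
    rw [pvFactLoop]
    by_cases hg : p * p ≤ m
    · rw [if_pos ⟨hp, hg⟩]
      have hpm : p < m := by nlinarith
      by_cases hd : m % p = 0
      · rw [if_pos hd]
        have hdvd : p ∣ m := Nat.dvd_of_mod_eq_zero hd
        have hpp : p.Prime := by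
          refine Nat.prime_def_minFac.mpr ⟨hp, le_antisymm (Nat.minFac_le (by omega)) ?_⟩
          exact hmin _ (Nat.minFac_prime (by omega)) (dvd_trans (Nat.minFac_dvd p) hdvd)
        obtain ⟨h1, h2, h3⟩ := pvExtract_spec m m p hp hm (le_refl m)
        have hmdvd : (pvExtract m m p).2 ∣ m :=
          ⟨p ^ (pvExtract m m p).1, by (conv_lhs => rw [h1]); ring⟩
        have hcop : (p ^ (pvExtract m m p).1).Coprime (pvExtract m m p).2 :=
          Nat.Coprime.pow_left _ ((Nat.Prime.coprime_iff_not_dvd hpp).mpr h2)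
        -- the remaining cofactor is at most m / p ≤ m / 2
        have hle : (pvExtract m m p).2 ≤ m / p := by
          obtain ⟨k, hk⟩ : ∃ k, m = k + 1 := ⟨m - 1, by omega⟩
          rw [hk]
          rw [show pvExtract (k + 1) (k + 1) p
              = ((pvExtract k ((k + 1) / p) p).1 + 1, (pvExtract k ((k + 1) / p) p).2) from by
            rw [pvExtract, if_pos ⟨hp, by omega, by rw [← hk]; exact hd⟩]]
          exact pvExtract_snd_le k ((k + 1) / p) p
        have hdiv2 : (pvExtract m m p).2 ≤ m / 2 :=
          le_trans hle (Nat.div_le_div_left hp (by omega))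
        have hih : pvFactLoop fuel (pvExtract m m p).2 (p + 1)
            = (pvExtract m m p).2.divisors.card := by
          refine ih (pvExtract m m p).2 (p + 1) (by omega) h3 ?_ ?_
          · intro q hq hqd
            have hple : p ≤ q := hmin q hq (dvd_trans hqd hmdvd)
            have : q ≠ p := fun hqe => h2 (by rwa [hqe] at hqd)
            omega
          · have h2div : 2 * (m / 2) ≤ m := Nat.mul_div_le m 2
            omega
        have hpowcard : (p ^ (pvExtract m m p).1).divisors.card = (pvExtract m m p).1 + 1 := by
          rw [Nat.divisors_prime_pow hpp]; simp
        calc ((pvExtract m m p).1 + 1) * pvFactLoop fuel (pvExtract m m p).2 (p + 1)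
            = (p ^ (pvExtract m m p).1).divisors.card * (pvExtract m m p).2.divisors.card := by
              rw [hih, hpowcard]
          _ = ((p ^ (pvExtract m m p).1) * (pvExtract m m p).2).divisors.card :=
              (Nat.Coprime.card_divisors_mul hcop).symm
          _ = m.divisors.card := by rw [← h1]
      · rw [if_neg hd]
        refine ih m (p + 1) (by omega) hm ?_ (by omega)
        intro q hq hqd
        have hple : p ≤ q := hmin q hq hqd
        have : q ≠ p := fun hqe => hd (Nat.mod_eq_zero_of_dvd (by rwa [hqe] at hqd))
        omega
    · rw [if_neg (by tauto)]
      have hlt : m < p * p := by omega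
      by_cases hm1 : 1 < m
      · have hprime : m.Prime := by
          by_contra hnp
          have hmf : m.minFac.Prime := Nat.minFac_prime (by omega)
          have h1 : p ≤ m.minFac := hmin _ hmf (Nat.minFac_dvd m)
          have h2 : m.minFac ^ 2 ≤ m := Nat.minFac_sq_le_self hm hnp
          nlinarith
        rw [if_pos hm1, Nat.Prime.divisors hprime]
        rw [Finset.card_insert_of_notMem (by simp; omega), Finset.card_singleton]
      · have : m = 1 := by omega
        subst this
        rw [if_neg hm1, Nat.divisors_one, Finset.card_singleton]

-- the A-side fold counts divisors in [2, s]
theorem countP_pyRange_eq_card (p : Int → Prop) [DecidablePred p] (s : Nat) :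
    (PySem.List.pyRange 2 ((s : Int) + 1) 1).countP (fun d => decide (p d))
      = ((Finset.Ico 2 (s + 1)).filter (fun d : Nat => p (d : Int))).card := by
  induction s with
  | zero =>
    rw [PySem.List.pyRange_one_eq_nil (by norm_num)]
    simp
  | succ s ih =>
    push_cast
    by_cases hs : 1 ≤ s
    · rw [PySem.List.pyRange_one_succ_right (a := 2) (b := ((s : Nat) : Int) + 1) (by exact_mod_cast by omega)]
      rw [List.countP_append]
      have hIco : Finset.Ico 2 (s + 1 + 1) = insert (s + 1) (Finset.Ico 2 (s + 1)) :=
        Nat.Ico_succ_right_eq_insert_Ico (by omega)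
      rw [hIco, Finset.filter_insert]
      have hcast : (((s + 1 : Nat)) : Int) = ((s : Nat) : Int) + 1 := by push_cast; ring
      by_cases hp : p (((s : Nat) : Int) + 1)
      · rw [if_pos (by rwa [hcast])]
        rw [Finset.card_insert_of_notMem (by simp)]
        simp only [List.countP_cons, List.countP_nil, hp, decide_true]
        rw [ih]
        simp
      · rw [if_neg (by rwa [hcast])]
        simp only [List.countP_cons, List.countP_nil, hp, decide_false]
        rw [ih]
        simp
    · have : s = 0 := by omega
      subst this
      rw [show ((0 : Nat) : Int) + 1 + 1 = 2 by norm_num, PySem.List.pyRange_one_eq_nil (by norm_num)]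
      simp

-- divisor pairing: twice the number of divisors ≤ √N is τ(N) + [N square]
theorem card_small_divisors (N : Nat) (hN : 4 ≤ N) :
    2 * ((N.divisors.filter (fun d => d ≤ Nat.sqrt N)).card)
      = N.divisors.card + (if Nat.sqrt N * Nat.sqrt N = N then 1 else 0) := by
  have hN0 : N ≠ 0 := by omega
  set s := Nat.sqrt N with hs
  have hLfilter : N.divisors.filter (fun d => d ≤ s) = N.divisors.filter (fun d => d * d ≤ N) := by
    apply Finset.filter_congr
    intro d _
    exact ⟨fun h => Nat.le_sqrt.mp h, fun h => Nat.le_sqrt.mpr h⟩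
  set L := N.divisors.filter (fun d => d * d ≤ N) with hL
  set G := N.divisors.filter (fun d => N ≤ d * d) with hG
  have hcardLG : L.card = G.card := by
    apply Finset.card_bij' (i := fun d _ => N / d) (j := fun d _ => N / d)
    · intro d hd
      rw [hL, Finset.mem_filter, Nat.mem_divisors] at hd
      obtain ⟨⟨hdvd, _⟩, hsq⟩ := hd
      have hdpos : 0 < d := Nat.pos_of_dvd_of_pos hdvd (by omega)
      have hc : d * (N / d) = N := Nat.mul_div_cancel' hdvd
      rw [hG, Finset.mem_filter, Nat.mem_divisors]
      refine ⟨⟨Nat.div_dvd_of_dvd hdvd, hN0⟩, ?_⟩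
      have hdle : d ≤ N / d := Nat.le_of_mul_le_mul_left (by omega) hdpos
      calc N = d * (N / d) := hc.symm
        _ ≤ (N / d) * (N / d) := Nat.mul_le_mul_right _ hdle
    · intro d hd
      rw [hG, Finset.mem_filter, Nat.mem_divisors] at hd
      obtain ⟨⟨hdvd, _⟩, hsq⟩ := hd
      have hdpos : 0 < d := Nat.pos_of_dvd_of_pos hdvd (by omega)
      have hc : d * (N / d) = N := Nat.mul_div_cancel' hdvd
      rw [hL, Finset.mem_filter, Nat.mem_divisors]
      refine ⟨⟨Nat.div_dvd_of_dvd hdvd, hN0⟩, ?_⟩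
      have hdge : N / d ≤ d := Nat.le_of_mul_le_mul_left (by omega) hdpos
      calc (N / d) * (N / d) ≤ (N / d) * d := Nat.mul_le_mul_left _ hdge
        _ = N := by rw [mul_comm]; exact hc
    · intro d hd
      rw [hL, Finset.mem_filter, Nat.mem_divisors] at hd
      exact Nat.div_div_self hd.1.1 hN0
    · intro d hd
      rw [hG, Finset.mem_filter, Nat.mem_divisors] at hd
      exact Nat.div_div_self hd.1.1 hN0
  have hunion : L ∪ G = N.divisors := by
    rw [hL, hG, ← Finset.filter_or]
    apply Finset.filter_true_of_mem
    intro d _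
    exact Nat.le_total (d * d) N
  have hinter : L ∩ G = N.divisors.filter (fun d => d * d = N) := by
    rw [hL, hG, ← Finset.filter_and]
    apply Finset.filter_congr
    intro d _
    omega
  have hintercard : (L ∩ G).card = (if s * s = N then 1 else 0) := by
    rw [hinter]
    split_ifs with hsq
    · rw [show N.divisors.filter (fun d => d * d = N) = {s} from ?_]
      · exact Finset.card_singleton s
      · apply Finset.ext
        intro d
        simp only [Finset.mem_filter, Nat.mem_divisors, Finset.mem_singleton]
        constructor
        · rintro ⟨_, hdd⟩
          have := Nat.mul_self_inj.mp (hdd.trans hsq.symm)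
          omega
        · rintro rfl
          exact ⟨⟨⟨s, hsq.symm⟩, hN0⟩, hsq⟩
    · rw [Finset.card_eq_zero, Finset.filter_eq_empty_iff]
      intro d _ hdd
      exact hsq (by rw [hs, ← hdd, Nat.sqrt_eq])
  have hmain := Finset.card_union_add_card_inter L G
  rw [hunion, hintercard] at hmain
  rw [hLfilter]
  split_ifs at hmain ⊢ <;> omega

-- ===== VERDICT (by name: the statement is the Claim_ definition above) =====
theorem M_function_spec : Claim_equal_M_function := by
  unfold Claim_equal_M_function Spec_M_function
  intro n _
  unfold M_function M_function_alt
  by_cases h4 : n < 4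
  · rw [if_pos h4, if_pos h4]
  · rw [if_neg h4, if_neg h4]
    have hn : n = ((n.toNat : Nat) : Int) := by omega
    set N := n.toNat with hNdef
    have hN : 4 ≤ N := by omega
    set s := Nat.sqrt N with hsdef
    have hs2 : 2 ≤ s := Nat.le_sqrt.mpr (by omega)
    -- A side: the fold counts divisors d with 2 ≤ d ≤ s
    rw [PySem.List.foldl_ite_add_one]
    rw [show n = ((N : Nat) : Int) from hn]
    rw [countP_pyRange_eq_card (fun d => PySem.Int.mod ((N : Nat) : Int) d = 0) s]
    have hset : (Finset.Ico 2 (s + 1)).filter (fun d : Nat => PySem.Int.mod ((N : Nat) : Int) ((d : Nat) : Int) = 0)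
        = (N.divisors.filter (fun d => d ≤ s)).erase 1 := by
      apply Finset.ext
      intro d
      simp only [Finset.mem_filter, Finset.mem_Ico, Finset.mem_erase, Nat.mem_divisors]
      rw [PySem.Int.mod_eq_zero_iff_dvd, Int.natCast_dvd_natCast]
      constructor
      · rintro ⟨⟨h2, hlt⟩, hdvd⟩
        exact ⟨by omega, ⟨⟨hdvd, by omega⟩, by omega⟩⟩
      · rintro ⟨h1, ⟨⟨hdvd, _⟩, hle⟩⟩
        have hdpos : 0 < d := Nat.pos_of_dvd_of_pos hdvd (by omega)
        exact ⟨⟨by omega, by omega⟩, hdvd⟩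
    rw [hset]
    have h1mem : (1 : Nat) ∈ N.divisors.filter (fun d => d ≤ s) := by
      rw [Finset.mem_filter, Nat.mem_divisors]
      exact ⟨⟨one_dvd N, by omega⟩, by omega⟩
    rw [Finset.card_erase_of_mem h1mem]
    -- B side
    have htau : pvFactLoop (2 * N) N 2 = N.divisors.card :=
      pvFactLoop_eq_card (2 * N) N 2 (le_refl 2) (by omega) (fun q hq _ => hq.two_le) (by omega)
    have hpair := card_small_divisors N hN
    set L := (N.divisors.filter (fun d => d ≤ s)).card with hLdef
    have hL1 : 1 ≤ L := Finset.card_pos.mpr ⟨1, h1mem⟩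
    simp only []
    rw [htau]
    have harith : (((N.divisors.card) : Int) + (if Nat.sqrt N * Nat.sqrt N = N then (1:Int) else 0)) = 2 * (L : Int) := by
      rw [← hsdef] at *
      split_ifs with hsq
      · have : N.divisors.card + 1 = 2 * L := by
          have := hpair
          split_ifs at this
          omega
        omega
      · have : N.divisors.card = 2 * L := by
          have := hpair
          split_ifs at this
          omega
        omega
    rw [harith]
    rw [PySem.Int.floordiv_eq_ediv_of_pos (by norm_num)]
    rw [Int.mul_ediv_cancel_left _ (by norm_num)]
    omega
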